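-- pv_equiv track=rewrite | github.com/fqf2009/LeetCode | 2211_CountCollisionsOnRoad.py | countCollisions
-- ===== SOURCE A (Python) =====
-- def countCollisions(directions: str) -> int:
--     car1 = directions[0]
--     res = 0
--     nRight = 0  # count of 'R' left of car1, will continue to collide to the future 'S'
--     for car2 in directions[1:]:
--         twoCars = car1 + car2
--         if twoCars == 'RL':
--             res += 2 + nRight
--             nRight = 0
--             car1 = 'S'
--         elif twoCars in ('SL', 'RS'):
--             res += 1 + nRight
--             nRight = 0
--             car1 = 'S'
--         else:
--             if car1 == 'R':
--                 nRight += 1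
--             car1 = car2
--
--     return res
-- ===== SOURCE B (Python) =====
-- def countCollisions(directions: str) -> int:
--     # No pending-R counter: mark colliding cars locally, keep a global 'R' count,
--     # and snapshot nL + cntR at each collision; the last snapshot is the answer.
--     cntR = 0    # cars 'R' seen so far (anywhere in the prefix)
--     nL = 0      # 'L' cars that collide
--     lrun = False  # inside a run of colliding 'L's
--     ans = 0
--     for prev, c in zip(directions, directions[1:]):
--         if prev == 'R':
--             cntR += 1
--         lrun = c == 'L' and (prev == 'R' or prev == 'S' or lrun)
--         if lrun:
--             nL += 1
--             ans = nL + cntR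
--         elif c == 'S' and prev == 'R':
--             ans = nL + cntR
--     return ans
-- ===== Notes on version B (the rewrite author's own statement) =====
-- stated objective: alternative
-- what changed: B drops A's pending-R accumulator with its collision resets and its collapsing of collided pairs into a synthetic stationary car: it zips adjacent character pairs, marks colliding L-runs and direct R-into-S hits locally, keeps one global running count of rightward cars, and the answer is the nL+cntR snapshot taken at the last collision.
import Mathlib
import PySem

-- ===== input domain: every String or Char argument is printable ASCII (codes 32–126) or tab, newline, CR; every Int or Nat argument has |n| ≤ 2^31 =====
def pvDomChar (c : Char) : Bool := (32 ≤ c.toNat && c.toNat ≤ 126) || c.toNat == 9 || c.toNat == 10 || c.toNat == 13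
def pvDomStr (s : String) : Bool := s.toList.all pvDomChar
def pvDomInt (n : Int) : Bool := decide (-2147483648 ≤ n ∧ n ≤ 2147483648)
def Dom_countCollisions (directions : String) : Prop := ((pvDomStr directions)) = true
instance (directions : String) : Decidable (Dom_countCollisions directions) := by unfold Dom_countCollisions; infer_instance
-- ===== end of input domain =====

-- B replaces A's pending-R accumulator with local collision marking plus a global 'R' count snapshotted
-- at the last collision (same cost, a different accounting of the same answer).


-- ===== PORT A =====
-- loop body of A; 'twoCars == "RL"' etc. on a two-char concatenation is exactly the pairwise char comparison
def countCollisionsStep (st : Char × Int × Int) (car2 : Char) : Char × Int × Int :=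
  if st.1 = 'R' ∧ car2 = 'L' then ('S', st.2.1 + 2 + st.2.2, 0)
  else if (st.1 = 'S' ∧ car2 = 'L') ∨ (st.1 = 'R' ∧ car2 = 'S') then ('S', st.2.1 + 1 + st.2.2, 0)
  else (car2, st.2.1, if st.1 = 'R' then st.2.2 + 1 else st.2.2)

def countCollisions (directions : String) : Int :=
  match PySem.Str.pyGet? directions 0 with
  | none => 0  -- directions[0] raises IndexError here; excluded by Pre_
  | some car1 =>
    -- directions[1:] is exactly toList.drop 1; the state is (car1, res, nRight)
    ((directions.toList.drop 1).foldl countCollisionsStep (car1, 0, 0)).2.1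

-- ===== PORT B =====
-- loop body of B; state is (cntR, nL, lrun, ans), the pair pc is (prev, c) from the zip
def countCollisionsAltStep (st : Int × Int × Bool × Int) (pc : Char × Char) : Int × Int × Bool × Int :=
  let cntR := if pc.1 = 'R' then st.1 + 1 else st.1
  let lrun := pc.2 == 'L' && (pc.1 == 'R' || pc.1 == 'S' || st.2.2.1)
  if lrun then (cntR, st.2.1 + 1, lrun, st.2.1 + 1 + cntR)
  else if pc.2 = 'S' ∧ pc.1 = 'R' then (cntR, st.2.1, lrun, st.2.1 + cntR)
  else (cntR, st.2.1, lrun, st.2.2.2)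

def countCollisions_alt (directions : String) : Int :=
  -- zip(directions, directions[1:]) is toList zipped with its drop 1
  ((directions.toList.zip (directions.toList.drop 1)).foldl
      countCollisionsAltStep (0, 0, false, 0)).2.2.2

-- ===== PRECONDITION & SPEC =====
-- Pre_ excludes only the empty string, on which A raises IndexError (it reads directions[0]).
def Pre_countCollisions (directions : String) : Prop := directions.toList ≠ []
instance (directions : String) : Decidable (Pre_countCollisions directions) := by
  unfold Pre_countCollisions; infer_instance
def pvWitness_countCollisions : String := "RL"

def Spec_countCollisions (directions : String) (out : Int) : Prop := out = countCollisions_alt directions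
instance (directions : String) (out : Int) : Decidable (Spec_countCollisions directions out) := by
  unfold Spec_countCollisions; infer_instance

-- ===== CLAIM (what is proved, stated in full; the proofs are below) =====
def Claim_equal_countCollisions : Prop := ∀ (directions : String), Dom_countCollisions directions → Pre_countCollisions directions → Spec_countCollisions directions (countCollisions directions)

-- ===== LEMMAS AND PROOFS =====

-- Bisimulation invariant between A's state (car1, res, nRight) and B's state (cntR, nL, lrun, ans),
-- p being the last character already consumed: car1 collapses to 'S' inside a colliding L-run,
-- res is the last snapshot, and the pending count nRight is cntR + nL - ans.
lemma countCollisions_inv (u : List Char) : ∀ (p car1 : Char) (res nR cntR nL ans : Int) (lrun : Bool),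
    car1 = (if lrun then 'S' else p) →
    res = ans →
    nR = cntR + nL - ans →
    (lrun = true → p = 'L') →
    (u.foldl countCollisionsStep (car1, res, nR)).2.1
      = (((p :: u).zip u).foldl countCollisionsAltStep (cntR, nL, lrun, ans)).2.2.2 := by
  induction u with
  | nil =>
    intro p car1 res nR cntR nL ans lrun h1 h2 h3 h4
    simp [h2]
  | cons c u' ih =>
    intro p car1 res nR cntR nL ans lrun h1 h2 h3 h4
    subst h1; subst h2; subst h3
    simp only [List.zip_cons_cons, List.foldl_cons]
    by_cases hl : lrun = true
    · have hp : p = 'L' := h4 hl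
      subst hp; subst hl
      by_cases hcL : c = 'L'
      · subst hcL
        simp only [countCollisionsStep, countCollisionsAltStep]
        simp
        apply ih <;> first | tauto | omega | (intro _; omega) | (simp only []; done) | (simp only []; omega)
      · by_cases hcS : c = 'S'
        · subst hcS
          simp only [countCollisionsStep, countCollisionsAltStep]
          simp
          apply ih <;> first | tauto | omega | (intro _; omega) | (simp only []; done) | (simp only []; omega)
        · simp only [countCollisionsStep, countCollisionsAltStep]
          simp [hcL, hcS]
          apply ih <;> first | tauto | omega | (intro _; omega) | (simp [hcL, hcS]; done) | (simp [hcL, hcS]; omega)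
    · simp only [Bool.not_eq_true] at hl
      subst hl
      by_cases hpR : p = 'R'
      · subst hpR
        by_cases hcL : c = 'L'
        · subst hcL
          simp only [countCollisionsStep, countCollisionsAltStep]
          simp
          apply ih <;> first | tauto | omega | (intro _; omega) | (simp only []; done) | (simp only []; omega)
        · by_cases hcS : c = 'S'
          · subst hcS
            simp only [countCollisionsStep, countCollisionsAltStep]
            simp
            apply ih <;> first | tauto | omega | (intro _; omega) | (simp only []; done) | (simp only []; omega)
          · simp only [countCollisionsStep, countCollisionsAltStep]
            simp [hcL, hcS]
            apply ih <;> first | tauto | omega | (intro _; omega) | (simp [hcL, hcS]; done) | (simp [hcL, hcS]; omega)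
      · by_cases hpS : p = 'S'
        · subst hpS
          by_cases hcL : c = 'L'
          · subst hcL
            simp only [countCollisionsStep, countCollisionsAltStep]
            simp
            apply ih <;> first | tauto | omega | (intro _; omega) | (simp only []; done) | (simp only []; omega)
          · by_cases hcS : c = 'S'
            · subst hcS
              simp only [countCollisionsStep, countCollisionsAltStep]
              simp
              apply ih <;> first | tauto | omega | (intro _; omega) | (simp only []; done) | (simp only []; omega)
            · simp only [countCollisionsStep, countCollisionsAltStep]
              simp [hcL, hcS]
              apply ih <;> first | tauto | omega | (intro _; omega) | (simp [hcL, hcS]; done) | (simp [hcL, hcS]; omega)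
        · by_cases hcL : c = 'L'
          · subst hcL
            simp only [countCollisionsStep, countCollisionsAltStep]
            simp [hpR, hpS]
            apply ih <;> first | tauto | omega | (intro _; omega) | (simp [hpR, hpS]; done) | (simp [hpR, hpS]; omega)
          · by_cases hcS : c = 'S'
            · subst hcS
              simp only [countCollisionsStep, countCollisionsAltStep]
              simp [hpR, hpS]
              apply ih <;> first | tauto | omega | (intro _; omega) | (simp [hpR, hpS]; done) | (simp [hpR, hpS]; omega)
            · simp only [countCollisionsStep, countCollisionsAltStep]
              simp [hpR, hpS, hcL, hcS]
              apply ih <;> first | tauto | omega | (intro _; omega) | (simp [hpR, hpS, hcL, hcS]; done) | (simp [hpR, hpS, hcL, hcS]; omega)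

-- ===== VERDICT (by name: the statement is the Claim_ definition above) =====
theorem countCollisions_spec : Claim_equal_countCollisions := by
  intro directions _ hne
  unfold Spec_countCollisions
  rcases hlist : directions.toList with _ | ⟨c, t⟩
  · exact absurd hlist hne
  have hget : PySem.Str.pyGet? directions 0 = some c := by
    have h0 : PySem.Str.pyGet? directions ((0 : Nat) : Int) = directions.toList[(0 : Nat)]? :=
      PySem.Str.pyGet?_natCast directions 0
    simpa [hlist] using h0
  have hA : countCollisions directions = (t.foldl countCollisionsStep (c, 0, 0)).2.1 := by
    rw [countCollisions, hget]
    simp [hlist]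
  rw [hA, countCollisions_alt, hlist]
  simpa using countCollisions_inv t c c 0 0 0 0 0 false (by simp) rfl (by ring) (by simp)
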